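-- pv_equiv track=rewrite | github.com/eselyavka/python | splitArrayEqualSum.py | splitArrayEqualSum
-- ===== SOURCE A (Python) =====
-- def splitArrayEqualSum(nums):
--     """
--     :type nums: List[int]
--     :rtype: List[List[]]
--     """
--     sum_nums = sum(nums)
--     sub_sum = 0
--
--     for i in range(len(nums) - 1, -1, -1):
--         sub_sum += nums[i]
--         if sum_nums - sub_sum == sub_sum:
--             return [nums[:i], nums[i:]]
--
--     return []
-- ===== SOURCE B (Python) =====
-- def splitArrayEqualSum(nums):
--     # Staged: (1) tabulate prefix sums, (2) collect all equal-split cut points,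
--     # (3) slice once at the rightmost cut.
--     total = sum(nums)
--     prefixes = []
--     acc = 0
--     for x in nums:
--         prefixes.append(acc)
--         acc += x
--     cuts = [i for i, p in enumerate(prefixes) if 2 * p == total]
--     if not cuts:
--         return []
--     i = cuts[-1]
--     return [nums[:i], nums[i:]]
-- ===== Notes on version B (the rewrite author's own statement) =====
-- stated objective: alternative
-- what changed: A is a single backward suffix-sum loop with early return; B is staged: first tabulate all prefix sums into a list, then filter out all cut indices where 2*prefix equals the total by a comprehension over enumerate, then slice once at the rightmost collected cut.
import Mathlib
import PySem

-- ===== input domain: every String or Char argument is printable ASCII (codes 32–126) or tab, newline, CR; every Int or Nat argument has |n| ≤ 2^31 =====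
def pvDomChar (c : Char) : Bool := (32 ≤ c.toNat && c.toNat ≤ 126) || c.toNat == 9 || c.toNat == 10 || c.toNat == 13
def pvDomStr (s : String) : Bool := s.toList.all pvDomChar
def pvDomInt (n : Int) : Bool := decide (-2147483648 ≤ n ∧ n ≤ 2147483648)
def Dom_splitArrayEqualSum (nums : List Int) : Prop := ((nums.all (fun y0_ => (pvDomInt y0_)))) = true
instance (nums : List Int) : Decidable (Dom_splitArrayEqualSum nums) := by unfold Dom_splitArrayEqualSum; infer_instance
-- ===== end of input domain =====

-- B replaces A's backward suffix-sum loop with early return by a staged pipeline: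
-- tabulate prefix sums, filter all equal-split cut indices, slice at the last one
-- (alternative decomposition, same cost).

-- ===== PORT A =====
-- the backward loop with early return: first index (scanning from the right) with an equal split
def pvALoop (nums : List Int) (sumNums : Int) : Int → List Int → Option (List (List Int))
  | _, [] => none
  | subSum, i :: rest =>
      let subSum' := subSum + PySem.List.pyGetD nums i 0
      if sumNums - subSum' = subSum' then
        some [PySem.List.slice nums none (some i), PySem.List.slice nums (some i) none]
      else pvALoop nums sumNums subSum' rest

def splitArrayEqualSum (nums : List Int) : List (List Int) :=
  let sumNums := nums.sum
  match pvALoop nums sumNums 0 (PySem.List.pyRange ((nums.length : Int) - 1) (-1) (-1)) with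
  | some r => r
  | none => []

-- ===== PORT B =====
def splitArrayEqualSum_alt (nums : List Int) : List (List Int) :=
  let total := nums.sum
  -- pass 1: prefixes[i] = sum(nums[:i])
  let st := nums.foldl (fun (st : List Int × Int) x => (st.1 ++ [st.2], st.2 + x)) ([], 0)
  let prefixes := st.1
  -- pass 2: all cut indices with an equal split
  let cuts := ((PySem.List.enumerate prefixes 0).filter (fun p => 2 * p.2 == total)).map (·.1)
  -- pass 3: slice at the last cut
  if cuts = [] then []
  else
    let i := PySem.List.pyGetD cuts (-1) 0
    [PySem.List.slice nums none (some i), PySem.List.slice nums (some i) none]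

-- ===== PRECONDITION & SPEC =====
def Spec_splitArrayEqualSum (nums : List Int) (out : List (List Int)) : Prop := out = splitArrayEqualSum_alt nums
instance (nums : List Int) (out : List (List Int)) : Decidable (Spec_splitArrayEqualSum nums out) := by unfold Spec_splitArrayEqualSum; infer_instance

-- ===== CLAIM (what is proved, stated in full; the proofs are below) =====
def Claim_equal_splitArrayEqualSum : Prop := ∀ (nums : List Int), Dom_splitArrayEqualSum nums → Spec_splitArrayEqualSum nums (splitArrayEqualSum nums)

-- ===== LEMMAS AND PROOFS =====

def pvInt (k : Nat) : Int := k

-- the common intermediate: the rightmost split point at index ≤ k giving an equal split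
def pvBest (nums : List Int) : Nat → Option (List (List Int))
  | 0 => if (nums.take 0).sum = (nums.drop 0).sum then some [nums.take 0, nums.drop 0] else none
  | k+1 => if (nums.take (k+1)).sum = (nums.drop (k+1)).sum then some [nums.take (k+1), nums.drop (k+1)]
           else pvBest nums k

def pvCuts (nums : List Int) (k : Nat) : List Nat :=
  (List.range k).filter (fun j => 2 * (nums.take j).sum == nums.sum)

theorem pv_take_add_drop (nums : List Int) (k : Nat) :
    (nums.take k).sum + (nums.drop k).sum = nums.sum := by
  rw [← List.sum_append, List.take_append_drop]

theorem pv_drop_succ (nums : List Int) (k : Nat) (hk : k < nums.length) :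
    (nums.drop k).sum = nums[k] + (nums.drop (k+1)).sum := by
  rw [List.drop_eq_getElem_cons hk, List.sum_cons]

theorem pvALoop_eq_best (nums : List Int) (k : Nat) (hk : k < nums.length) :
    pvALoop nums nums.sum ((nums.drop (k+1)).sum)
      (PySem.List.pyRange (k : Int) (-1) (-1)) = pvBest nums k := by
  induction k with
  | zero =>
      rw [PySem.List.pyRange_neg_one_cons (by omega)]
      rw [PySem.List.pyRange_neg_one_eq_nil (by omega)]
      simp only [pvALoop, pvBest]
      rw [PySem.List.pyGetD_natCast]
      rw [PySem.List.slice_to_natCast, PySem.List.slice_from_natCast]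
      have h0 : nums.getD 0 0 = nums[0] := List.getD_eq_getElem _ _ hk
      have hd := pv_drop_succ nums 0 hk
      have ht := pv_take_add_drop nums 0
      rw [h0]
      by_cases hc : (nums.take 0).sum = (nums.drop 0).sum
      · rw [if_pos (by omega), if_pos hc]
      · rw [if_neg (by omega), if_neg hc]
  | succ j ih =>
      have hj : (j : Int) + 1 - 1 = (j : Int) := by ring
      rw [show ((j+1 : Nat) : Int) = (j : Int) + 1 by push_cast; ring]
      rw [PySem.List.pyRange_neg_one_cons (by omega)]
      simp only [pvALoop]
      rw [hj, show ((j : Int) + 1) = ((j+1 : Nat) : Int) by push_cast; ring]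
      rw [PySem.List.pyGetD_natCast]
      rw [PySem.List.slice_to_natCast, PySem.List.slice_from_natCast]
      have h0 : nums.getD (j+1) 0 = nums[j+1] := List.getD_eq_getElem _ _ hk
      have hd := pv_drop_succ nums (j+1) hk
      have ht := pv_take_add_drop nums (j+1)
      rw [h0]
      simp only [pvBest]
      by_cases hc : (nums.take (j+1)).sum = (nums.drop (j+1)).sum
      · rw [if_pos (by omega), if_pos hc]
      · rw [if_neg (by omega), if_neg hc]
        rw [show (nums.drop (j+1+1)).sum + nums[j+1] = (nums.drop (j+1)).sum by omega]
        exact ih (by omega)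

-- A's result is the rightmost cut ≤ k, expressed as the last element of pvCuts (k+1)
theorem pvBest_eq_cuts_last (nums : List Int) (k : Nat) :
    pvBest nums k
      = (pvCuts nums (k+1)).getLast?.map (fun j => [nums.take j, nums.drop j]) := by
  induction k with
  | zero =>
      simp only [pvBest, pvCuts, List.range_succ, List.range_zero, List.nil_append]
      have ht := pv_take_add_drop nums 0
      by_cases hc : (nums.take 0).sum = (nums.drop 0).sum
      · rw [if_pos hc, List.filter_cons, if_pos (by simp only [beq_iff_eq]; omega)]
        simp
      · rw [if_neg hc, List.filter_cons, if_neg (by simp only [beq_iff_eq]; omega)]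
        simp
  | succ j ih =>
      simp only [pvBest]
      have ht := pv_take_add_drop nums (j+1)
      rw [pvCuts, List.range_succ, List.filter_append]
      by_cases hc : (nums.take (j+1)).sum = (nums.drop (j+1)).sum
      · rw [if_pos hc, List.filter_cons, if_pos (by simpa using by omega)]
        simp
      · rw [if_neg hc, List.filter_cons, if_neg (by simpa using by omega)]
        simpa [pvCuts] using ih

-- B's pass 1 produces exactly the prefix-sum table
theorem pvScan (nums : List Int) : ∀ (l : List Int) (a : Int),
    nums.foldl (fun (st : List Int × Int) x => (st.1 ++ [st.2], st.2 + x)) (l, a)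
      = (l ++ (List.range nums.length).map (fun k => a + (nums.take k).sum), a + nums.sum) := by
  induction nums with
  | nil => intro l a; simp
  | cons x xs ih =>
      intro l a
      simp only [List.foldl_cons, ih, List.length_cons, List.range_succ_eq_map, Prod.mk.injEq]
      refine ⟨?_, by simp; ring⟩
      rw [List.append_assoc]
      congr 1
      simp only [List.map_cons, List.map_map, List.singleton_append]
      congr 1
      · simp
      · apply List.map_congr_left
        intro k _
        simp only [Function.comp, List.take_succ_cons, List.sum_cons]
        ring

-- enumerate of a range-indexed table is the graph of the table function
theorem pvEnumMap (g : Nat → Int) : ∀ (n : Nat),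
    PySem.List.enumerate ((List.range n).map g) 0
      = (List.range n).map (fun (k : Nat) => (pvInt k, g k)) := by
  intro n
  induction n with
  | zero => simp [PySem.List.enumerate_nil]
  | succ m ih =>
      rw [List.range_succ, List.map_append, List.map_append,
          PySem.List.enumerate_append, ih]
      simp [PySem.List.enumerate_cons, PySem.List.enumerate_nil, pvInt]

-- filtering the graph of a table and projecting the index = filtering the indices
theorem pvFilterGraph (g : Nat → Int) (c : Int → Bool) (n : Nat) :
    (((List.range n).map (fun (k : Nat) => (pvInt k, g k))).filter
        (fun p => c p.2)).map (fun p => p.1)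
      = ((List.range n).filter (fun k => c (g k))).map pvInt := by
  induction n with
  | zero => simp
  | succ m ih =>
      rw [List.range_succ, List.map_append, List.filter_append, List.map_append,
          List.filter_append, List.map_append, ih]
      by_cases hc : c (g m)
      · simp [hc]
      · simp [hc]

-- ===== VERDICT (by name: the statement is the Claim_ definition above) =====
theorem splitArrayEqualSum_spec : Claim_equal_splitArrayEqualSum := by
  intro nums _
  unfold Spec_splitArrayEqualSum splitArrayEqualSum splitArrayEqualSum_alt
  simp only
  rw [pvScan nums [] 0]
  simp only [List.nil_append]
  rw [pvEnumMap (fun k => 0 + (nums.take k).sum) nums.length]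
  rw [pvFilterGraph (fun k => 0 + (nums.take k).sum) (fun v => 2 * v == nums.sum) nums.length]
  have hfc : ((List.range nums.length).filter
      (fun k => 2 * (0 + (nums.take k).sum) == nums.sum)) = pvCuts nums nums.length := by
    unfold pvCuts
    apply List.filter_congr
    intro k _
    norm_num
  rw [hfc]
  rcases Nat.eq_zero_or_pos nums.length with hz | hp
  · have he : nums = [] := List.eq_nil_of_length_eq_zero hz
    subst he
    decide
  · obtain ⟨m, hn⟩ : ∃ m, nums.length = m + 1 := ⟨nums.length - 1, by omega⟩
    rw [hn]
    have hm : m < nums.length := by omega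
    have h1 : ((m+1 : Nat) : Int) - 1 = (m : Int) := by push_cast; ring
    rw [h1]
    have h2 : (nums.drop (m+1)).sum = 0 := by
      rw [List.drop_eq_nil_of_le (by omega)]; simp
    have hA : pvALoop nums nums.sum 0 (PySem.List.pyRange (m : Int) (-1) (-1)) = pvBest nums m := by
      rw [← h2]; exact pvALoop_eq_best nums m hm
    rw [hA, pvBest_eq_cuts_last nums m]
    cases hlast : (pvCuts nums (m+1)).getLast? with
    | none =>
        have hnil : pvCuts nums (m+1) = [] := List.getLast?_eq_none_iff.mp hlast
        rw [hnil]
        simp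
    | some j =>
        have hne : pvCuts nums (m+1) ≠ [] := by
          intro h; rw [h] at hlast; simp at hlast
        have hne' : (pvCuts nums (m+1)).map pvInt ≠ [] := by
          simpa using hne
        rw [if_neg hne']
        simp only [Option.map_some]
        have hlastmap : ((pvCuts nums (m+1)).map pvInt).getLast? = some (pvInt j) := by
          rw [List.getLast?_map, hlast]; rfl
        have hg : PySem.List.pyGetD ((pvCuts nums (m+1)).map pvInt) (-1) 0 = pvInt j := by
          rw [PySem.List.pyGetD_neg_one _ 0 hne']
          have h3 := List.getLast?_eq_some_getLast (l := (pvCuts nums (m+1)).map pvInt) hne'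
          rw [h3] at hlastmap
          exact Option.some.inj hlastmap
        rw [hg]
        show _ = [PySem.List.slice nums none (some (j:Int)), PySem.List.slice nums (some (j:Int)) none]
        rw [PySem.List.slice_to_natCast, PySem.List.slice_from_natCast]
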